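-- pv_equiv track=rewrite | github.com/gangbro-dev/Solving | programers/2021 KAKAO BLIND RECRUITMENT/신규 아이디 추천/solution.py | solution
-- ===== SOURCE A (Python) =====
-- def solution(new_id):
--     # 1
--     new_id = new_id.lower()
--
--     # 2
--     del_list = []
--     for i in new_id:
--         if i.isalnum() or i in '-_.':
--             pass
--         else:
--             del_list.append(i)
--     for i in del_list:
--         new_id = new_id.replace(i, '')
--
--     # 3
--     new_new_id = new_id
--     new_new_id = new_new_id.replace('..', '.')
--     while new_new_id != new_id:
--         new_id = new_new_id
--         new_new_id = new_new_id.replace('..', '.')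
--
--     # 4
--     if new_id[0] == '.':
--         new_id = new_id[1:]
--     if new_id[-1:] == '.':
--         new_id = new_id[:-1]
--
--     # 5
--     if not new_id:
--         new_id += 'a'
--
--     # 6
--     if len(new_id) > 15:
--         new_id = new_id[:15]
--         if new_id[-1] == '.':
--             new_id = new_id[:-1]
--     # 7
--     while len(new_id) < 3:
--         new_id += new_id[-1]
--
--     answer = new_id
--
--     return answer
-- ===== SOURCE B (Python) =====
-- def solution(new_id):
--     # single pass: lowercase, keep allowed chars, collapse consecutive dots on the fly
--     out = []
--     prev_dot = False
--     for c in new_id.lower():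
--         if c.isalnum() or c == '-' or c == '_':
--             out.append(c)
--             prev_dot = False
--         elif c == '.':
--             if not prev_dot:
--                 out.append(c)
--             prev_dot = True
--     t = ''.join(out)
--     if t.startswith('.'):
--         t = t[1:]
--     if t.endswith('.'):
--         t = t[:-1]
--     if not t:
--         t = 'a'
--     if len(t) > 15:
--         t = t[:15]
--         if t.endswith('.'):
--             t = t[:-1]
--     if len(t) < 3:
--         t = t + t[-1] * (3 - len(t))
--     return t
-- ===== Notes on version B (the rewrite author's own statement) =====
-- stated objective: alternative
-- what changed: A deletes each bad character with a separate whole-string str.replace pass (one per bad-character occurrence in del_list) and collapses '..' by re-running replace('..','.') to a fixpoint; B makes one fused pass that lowercases, filters and collapses consecutive dots with a prev_dot flag, and replaces the padding loop by a closed-form repeat of the last character.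
import Mathlib
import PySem

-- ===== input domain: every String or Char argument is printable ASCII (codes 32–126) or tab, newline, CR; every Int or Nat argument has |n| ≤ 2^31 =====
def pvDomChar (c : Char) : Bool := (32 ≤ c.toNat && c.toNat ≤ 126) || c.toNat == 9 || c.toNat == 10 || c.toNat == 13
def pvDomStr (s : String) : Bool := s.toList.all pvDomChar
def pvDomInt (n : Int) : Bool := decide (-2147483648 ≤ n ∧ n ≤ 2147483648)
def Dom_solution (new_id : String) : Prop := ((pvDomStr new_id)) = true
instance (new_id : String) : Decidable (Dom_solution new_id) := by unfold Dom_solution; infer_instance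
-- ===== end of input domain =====

-- B replaces A's per-bad-character whole-string `replace` passes and the `replace('..','.')` fixpoint loop
-- by one fused filter-and-collapse pass over the string (objective: alternative).

-- ===== PORT A =====
-- `i.isalnum() or i in '-_.'`
def pvAllowed (i : Char) : Bool := PySem.Chars.isalnum i || PySem.Chars.isIn [i] ['-', '_', '.']

-- `while new_new_id != new_id: ...` (fuel-guarded; fuel new_id.length+1 always suffices since each
-- productive `replace('..','.')` strictly shortens the string)
def pvAWhile : Nat → List Char → List Char → List Char
  | 0, n, _ => n
  | fuel + 1, n, nn =>
    if nn = n then n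
    else pvAWhile fuel nn (PySem.Chars.replace nn ['.', '.'] ['.'])

-- `while len(new_id) < 3: new_id += new_id[-1]`
def pvAPad (l : List Char) : List Char :=
  if _h : l.length < 3 then
    match PySem.List.pyGet? l (-1) with
    | some c => pvAPad (l ++ [c])
    | none => l
  else l
termination_by 3 - l.length
decreasing_by simp; omega

def solution (new_id : String) : String :=
  -- 1
  let l1 := PySem.Chars.lower new_id.toList
  -- 2
  let del_list := l1.foldl (fun d i => if pvAllowed i then d else d ++ [i]) ([] : List Char)
  let l2 := del_list.foldl (fun s i => PySem.Chars.replace s [i] []) l1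
  -- 3
  let l3 := pvAWhile (l2.length + 1) l2 (PySem.Chars.replace l2 ['.', '.'] ['.'])
  -- 4 (`new_id[0]` raises IndexError on the empty string: excluded by Pre_solution)
  let l4 := if PySem.List.pyGet? l3 0 = some '.' then PySem.List.slice l3 (some 1) none else l3
  let l5 := if PySem.List.slice l4 (some (-1)) none = ['.'] then PySem.List.slice l4 none (some (-1)) else l4
  -- 5
  let l6 := if l5 = [] then l5 ++ ['a'] else l5
  -- 6
  let l7 := if 15 < l6.length then
              let u := PySem.List.slice l6 none (some 15)
              if PySem.List.pyGet? u (-1) = some '.' then PySem.List.slice u none (some (-1)) else u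
            else l6
  -- 7
  String.ofList (pvAPad l7)

-- ===== PORT B =====
-- one step of B's single pass: keep allowed non-dot chars, collapse runs of dots via the prev_dot flag
def pvBStep (acc : List Char × Bool) (c : Char) : List Char × Bool :=
  if PySem.Chars.isalnum c || c == '-' || c == '_' then (acc.1 ++ [c], false)
  else if c == '.' then ((if acc.2 then acc.1 else acc.1 ++ [c]), true)
  else acc

def solution_alt (new_id : String) : String :=
  let t0 := ((PySem.Chars.lower new_id.toList).foldl pvBStep ([], false)).1
  let t1 := if PySem.Chars.startswith t0 ['.'] then PySem.List.slice t0 (some 1) none else t0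
  let t2 := if PySem.Chars.endswith t1 ['.'] then PySem.List.slice t1 none (some (-1)) else t1
  let t3 := if t2 = [] then ['a'] else t2
  let t4 := if 15 < t3.length then
              let u := PySem.List.slice t3 none (some 15)
              if PySem.Chars.endswith u ['.'] then PySem.List.slice u none (some (-1)) else u
            else t3
  let t5 := if t4.length < 3 then
              match PySem.List.pyGet? t4 (-1) with
              | some c => t4 ++ List.replicate (3 - t4.length) c
              | none => t4
            else t4
  String.ofList t5

-- ===== PRECONDITION & SPEC =====
-- Pre_ excludes exactly the strings with no kept character (nothing alphanumeric or '-','_','.'),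
-- on which A's `new_id[0]` raises IndexError.
def Pre_solution (new_id : String) : Prop :=
  (PySem.Chars.lower new_id.toList).any
    (fun c => PySem.Chars.isalnum c || c == '-' || c == '_' || c == '.') = true
instance (new_id : String) : Decidable (Pre_solution new_id) := by unfold Pre_solution; infer_instance

def pvWitness_solution : String := "...ABC!!def"

def Spec_solution (new_id : String) (out : String) : Prop := out = solution_alt new_id
instance (new_id : String) (out : String) : Decidable (Spec_solution new_id out) := by unfold Spec_solution; infer_instance

-- ===== CLAIM (what is proved, stated in full; the proofs are below) =====
def Claim_equal_solution : Prop := ∀ (new_id : String), Dom_solution new_id → Pre_solution new_id → Spec_solution new_id (solution new_id)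
-- ===== LEMMAS AND PROOFS =====

def pvDD : List Char → List Char
  | [] => []
  | [c] => [c]
  | c :: d :: t => if c = '.' ∧ d = '.' then '.' :: pvDD t else c :: pvDD (d :: t)

theorem pvReplace_go_dd (fuel : Nat) :
    ∀ (l acc : List Char), l.length ≤ fuel →
      PySem.Chars.replace.go ['.', '.'] ['.'] fuel l acc = acc.reverse ++ pvDD l := by
  induction fuel with
  | zero =>
    intro l acc h
    have : l = [] := List.eq_nil_of_length_eq_zero (Nat.le_zero.mp h)
    subst this
    simp [PySem.Chars.replace.go, pvDD]
  | succ fuel ih =>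
    intro l acc h
    match l with
    | [] => simp [PySem.Chars.replace.go, pvDD]
    | [c] =>
      rw [PySem.Chars.replace.go]
      simp only [List.isPrefixOf, Bool.and_false]
      rw [if_neg (by simp)]
      rw [ih [] (c :: acc) (by simp)]
      simp [pvDD]
    | c :: d :: t =>
      rw [PySem.Chars.replace.go]
      simp only [List.length_cons] at h
      by_cases hcd : c = '.' ∧ d = '.'
      · obtain ⟨rfl, rfl⟩ := hcd
        rw [if_pos (by simp [List.isPrefixOf])]
        rw [ih _ _ (by simp; omega)]
        simp [pvDD]
      · rw [if_neg (by
          simp only [List.isPrefixOf, List.isPrefixOf_nil_left, Bool.and_true, Bool.and_eq_true,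
            beq_iff_eq]
          exact fun hh => hcd ⟨hh.1.symm, hh.2.symm⟩)]
        rw [ih _ _ (by simp; omega)]
        simp [pvDD, hcd]

theorem pvReplace_dd (l : List Char) : PySem.Chars.replace l ['.', '.'] ['.'] = pvDD l := by
  rw [PySem.Chars.replace]
  simp only [List.isEmpty_cons, if_false, Bool.false_eq_true]
  exact pvReplace_go_dd l.length l [] (le_refl _)

theorem pvReplace_go_del (c : Char) (fuel : Nat) :
    ∀ (l acc : List Char), l.length ≤ fuel →
      PySem.Chars.replace.go [c] [] fuel l acc = acc.reverse ++ l.filter (fun x => !(x == c)) := by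
  induction fuel with
  | zero =>
    intro l acc h
    have : l = [] := List.eq_nil_of_length_eq_zero (Nat.le_zero.mp h)
    subst this
    simp [PySem.Chars.replace.go]
  | succ fuel ih =>
    intro l acc h
    match l with
    | [] => simp [PySem.Chars.replace.go]
    | a :: t =>
      rw [PySem.Chars.replace.go]
      simp only [List.length_cons] at h
      by_cases hac : c = a
      · subst hac
        rw [if_pos (by simp [List.isPrefixOf])]
        rw [ih _ _ (by simp; omega)]
        simp
      · rw [if_neg (by simp [List.isPrefixOf, hac])]
        rw [ih _ _ (by omega)]
        simp [Ne.symm hac]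

theorem pvReplace_del (c : Char) (l : List Char) :
    PySem.Chars.replace l [c] [] = l.filter (fun x => !(x == c)) := by
  rw [PySem.Chars.replace]
  simp only [List.isEmpty_cons, if_false, Bool.false_eq_true]
  exact pvReplace_go_del c l.length l [] (le_refl _)

theorem pvRemove_eq (ds : List Char) :
    ∀ m : List Char, ds.foldl (fun s i => PySem.Chars.replace s [i] []) m
      = m.filter (fun x => !(ds.contains x)) := by
  induction ds with
  | nil => intro m; simp
  | cons d ds ih =>
    intro m
    rw [List.foldl_cons, ih, pvReplace_del, List.filter_filter]
    apply List.filter_congr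
    intro x _
    by_cases hx : x = d <;> simp [hx, Ne.symm, bne]

theorem pvAllowed_eq (c : Char) :
    pvAllowed c = (PySem.Chars.isalnum c || c == '-' || c == '_' || c == '.') := by
  rw [Bool.eq_iff_iff]
  simp [pvAllowed, PySem.Chars.isIn_iff_infix, List.singleton_infix_iff]
  tauto

theorem pvStage2_eq (l1 : List Char) :
    (l1.foldl (fun d i => if pvAllowed i then d else d ++ [i]) ([] : List Char)).foldl
      (fun s i => PySem.Chars.replace s [i] []) l1 = l1.filter pvAllowed := by
  have hdel : (l1.foldl (fun d i => if pvAllowed i then d else d ++ [i]) ([] : List Char))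
      = l1.filter (fun i => !pvAllowed i) := by
    have hfun : (fun (d : List Char) (i : Char) => if pvAllowed i then d else d ++ [i])
        = (fun d i => if (!pvAllowed i) = true then d ++ [i] else d) := by
      funext d i; by_cases h : pvAllowed i <;> simp [h]
    rw [hfun, PySem.List.foldl_append_if]
    simp
  rw [hdel, pvRemove_eq]
  apply List.filter_congr
  intro x hx
  by_cases hA : pvAllowed x
  · simp only [hA, Bool.not_eq_eq_eq_not, Bool.not_true]
    have : x ∉ l1.filter (fun i => !pvAllowed i) := by simp [List.mem_filter, hA]
    simp [List.contains_iff_mem, this]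
  · have : x ∈ l1.filter (fun i => !pvAllowed i) := by simp [List.mem_filter, hx, hA]
    simp [List.contains_iff_mem, this, hA]

def pvClps : Bool → List Char → List Char
  | _, [] => []
  | prev, c :: t => if c = '.' then (if prev then pvClps true t else '.' :: pvClps true t) else c :: pvClps false t

theorem pvDD_len (l : List Char) : (pvDD l).length ≤ l.length := by
  induction l using pvDD.induct with
  | case1 => simp [pvDD]
  | case2 c => simp [pvDD]
  | case3 c d t h ih => simp [pvDD, h]; omega
  | case4 c d t h ih => simp [pvDD, h] at ih ⊢; omega

theorem pvDD_lt (l : List Char) (h : pvDD l ≠ l) : (pvDD l).length < l.length := by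
  induction l using pvDD.induct with
  | case1 => simp [pvDD] at h
  | case2 c => simp [pvDD] at h
  | case3 c d t hc ih =>
    obtain ⟨rfl, rfl⟩ := hc
    have := pvDD_len t
    rw [pvDD, if_pos ⟨rfl, rfl⟩]
    simp; omega
  | case4 c d t hc ih =>
    rw [pvDD, if_neg hc] at h ⊢
    simp only [List.length_cons]
    have hne : pvDD (d :: t) ≠ d :: t := by intro he; exact h (by rw [he])
    have hlt := ih hne
    simp only [List.length_cons] at hlt
    omega

theorem pvClps_dd (l : List Char) : ∀ prev, pvClps prev (pvDD l) = pvClps prev l := by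
  induction l using pvDD.induct with
  | case1 => intro prev; simp [pvDD]
  | case2 c => intro prev; simp [pvDD]
  | case3 c d t hc ih =>
    obtain ⟨rfl, rfl⟩ := hc
    intro prev
    rw [pvDD, if_pos ⟨rfl, rfl⟩]
    cases prev <;> simp [pvClps, ih]
  | case4 c d t hc ih =>
    intro prev
    rw [pvDD, if_neg hc]
    by_cases h1 : c = '.' <;> cases prev <;> simp [pvClps, h1, ih]

theorem pvDD_fix (l : List Char) (h : pvDD l = l) : pvClps false l = l := by
  induction l using pvDD.induct with
  | case1 => rfl
  | case2 c => by_cases hc : c = '.' <;> simp [pvClps, hc]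
  | case3 c d t hc ih =>
    exfalso
    obtain ⟨rfl, rfl⟩ := hc
    have hlen := congrArg List.length h
    have := pvDD_len t
    rw [pvDD, if_pos ⟨rfl, rfl⟩] at hlen
    simp at hlen
    omega
  | case4 c d t hc ih =>
    rw [pvDD, if_neg hc] at h
    have ht : pvDD (d :: t) = d :: t := by
      injection h
    have ihv := ih ht
    by_cases h1 : c = '.'
    · subst h1
      have hd : d ≠ '.' := fun he => hc ⟨rfl, he⟩
      rw [pvClps, if_neg hd] at ihv
      have ht2 : pvClps false t = t := by injection ihv
      rw [pvClps, if_pos rfl]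
      simp only [Bool.false_eq_true, if_false]
      rw [pvClps, if_neg hd, ht2]
    · rw [pvClps, if_neg h1, ihv]

theorem pvAWhile_eq (fuel : Nat) :
    ∀ n : List Char, n.length < fuel →
      pvAWhile fuel n (pvDD n) = pvClps false n := by
  induction fuel with
  | zero => intro n h; omega
  | succ fuel ih =>
    intro n h
    rw [pvAWhile, pvReplace_dd]
    by_cases he : pvDD n = n
    · rw [if_pos he, pvDD_fix n he]
    · rw [if_neg he]
      have hlt := pvDD_lt n he
      rw [ih (pvDD n) (by omega)]
      exact pvClps_dd n false

def pvBC : Bool → List Char → List Char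
  | _, [] => []
  | prev, c :: t =>
    if PySem.Chars.isalnum c || c == '-' || c == '_' then c :: pvBC false t
    else if c == '.' then (if prev then pvBC true t else '.' :: pvBC true t)
    else pvBC prev t

theorem pvFoldB (l : List Char) :
    ∀ (acc : List Char) (prev : Bool), (l.foldl pvBStep (acc, prev)).1 = acc ++ pvBC prev l := by
  induction l with
  | nil => intro acc prev; simp [pvBC]
  | cons c t ih =>
    intro acc prev
    rw [List.foldl_cons, pvBC]
    by_cases h1 : (PySem.Chars.isalnum c || c == '-' || c == '_') = true
    · rw [if_pos h1]
      simp only [pvBStep, if_pos h1, ih]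
      simp
    · rw [if_neg h1]
      by_cases h2 : c = '.'
      · subst h2
        rw [if_pos (by simp)]
        simp only [pvBStep, if_neg h1]
        cases prev <;> simp [ih]
      · have hbe : (c == '.') = false := by simpa using h2
        rw [if_neg (by simp [hbe])]
        simp only [pvBStep, if_neg h1, hbe, Bool.false_eq_true, if_false]
        exact ih acc prev

theorem pvBC_eq (l : List Char) : ∀ prev, pvBC prev l = pvClps prev (l.filter pvAllowed) := by
  induction l with
  | nil => intro prev; simp [pvBC, pvClps]
  | cons c t ih =>
    intro prev
    rw [pvBC]
    by_cases h1 : (PySem.Chars.isalnum c || c == '-' || c == '_') = true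
    · have hdot : c ≠ '.' := by
        rcases Bool.or_eq_true _ _ |>.mp h1 with h | h
        · rcases Bool.or_eq_true _ _ |>.mp h with h | h
          · intro he; subst he; simp [PySem.Chars.isalnum, PySem.Chars.isalpha,
              PySem.Chars.isdigit, PySem.Chars.isupper, PySem.Chars.islower] at h
          · intro he; subst he; simp at h
        · intro he; subst he; simp at h
      have hall : pvAllowed c = true := by
        rw [pvAllowed_eq]
        simp only [Bool.or_eq_true] at h1 ⊢
        tauto
      rw [if_pos h1, List.filter_cons_of_pos hall, pvClps, if_neg hdot, ih]
    · rw [if_neg h1]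
      by_cases h2 : c = '.'
      · subst h2
        have hall : pvAllowed '.' = true := by rw [pvAllowed_eq]; simp
        rw [if_pos (by simp), List.filter_cons_of_pos hall, pvClps, if_pos rfl]
        cases prev <;> simp [ih]
      · have hall : pvAllowed c = false := by
          rw [pvAllowed_eq]
          simp only [Bool.or_eq_true, beq_iff_eq] at h1
          push_neg at h1
          simp only [Bool.or_eq_false_iff, beq_eq_false_iff_ne]
          exact ⟨⟨⟨by simpa using h1.1.1, h1.1.2⟩, h1.2⟩, h2⟩
        rw [if_neg (by simpa using h2), List.filter_cons_of_neg (by simp [hall]), ih]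

theorem pvStart_iff (c : Char) (l : List Char) :
    PySem.Chars.startswith l [c] = true ↔ PySem.List.pyGet? l 0 = some c := by
  cases l with
  | nil => simp [PySem.Chars.startswith_iff, PySem.List.pyGet?, PySem.List.pyIdx?]
  | cons a t =>
    rw [PySem.Chars.startswith_iff]
    simp [List.cons_prefix_cons, PySem.List.pyGet?, PySem.List.pyIdx?, eq_comm]

theorem pvSuffix_singleton (c a : Char) (m : List Char) : [c] <:+ (m ++ [a]) ↔ c = a := by
  constructor
  · rintro ⟨u, hu⟩
    have := congrArg (List.getLast? ·) hu
    simpa [List.getLast?_append] using this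
  · rintro rfl; exact ⟨m, rfl⟩

theorem pvEnd_get_iff (c : Char) (l : List Char) :
    PySem.Chars.endswith l [c] = true ↔ PySem.List.pyGet? l (-1) = some c := by
  rcases List.eq_nil_or_concat l with rfl | ⟨m, a, rfl⟩
  · simp [PySem.Chars.endswith_iff, PySem.List.pyGet?, PySem.List.pyIdx?]
  · rw [List.concat_eq_append, PySem.Chars.endswith_iff, pvSuffix_singleton]
    have hg : PySem.List.pyGet? (m ++ [a]) (-1) = some a := by
      simp [PySem.List.pyGet?, PySem.List.pyIdx?]
    rw [hg]
    simp [eq_comm]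

theorem pvEnd_slice_iff (c : Char) (l : List Char) :
    PySem.Chars.endswith l [c] = true ↔ PySem.List.slice l (some (-1)) none = [c] := by
  rcases List.eq_nil_or_concat l with rfl | ⟨m, a, rfl⟩
  · simp [PySem.Chars.endswith_iff, PySem.List.slice]
  · rw [List.concat_eq_append, PySem.Chars.endswith_iff, pvSuffix_singleton]
    have hs : PySem.List.slice (m ++ [a]) (some (-1)) none = [a] := by simp [pysem]
    rw [hs]
    simp [eq_comm]

theorem pvPad_eq (l : List Char) :
    pvAPad l = (if l.length < 3 then
        match PySem.List.pyGet? l (-1) with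
        | some c => l ++ List.replicate (3 - l.length) c
        | none => l
      else l) := by
  match l with
  | [] => simp [pvAPad, PySem.List.pyGet?, PySem.List.pyIdx?]
  | [a] => simp [pvAPad, PySem.List.pyGet?, PySem.List.pyIdx?, List.replicate]
  | [a, b] => simp [pvAPad, PySem.List.pyGet?, PySem.List.pyIdx?, List.replicate]
  | a :: b :: c :: t =>
    have h3 : ¬ (t.length + 1 + 1 + 1 < 3) := by omega
    rw [pvAPad]
    simp [h3]

theorem pvTail_eq (t : List Char) :
    pvAPad (
      let l4 := if PySem.List.pyGet? t 0 = some '.' then PySem.List.slice t (some 1) none else t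
      let l5 := if PySem.List.slice l4 (some (-1)) none = ['.'] then PySem.List.slice l4 none (some (-1)) else l4
      let l6 := if l5 = [] then l5 ++ ['a'] else l5
      if 15 < l6.length then
        let u := PySem.List.slice l6 none (some 15)
        if PySem.List.pyGet? u (-1) = some '.' then PySem.List.slice u none (some (-1)) else u
      else l6) =
    (let t1 := if PySem.Chars.startswith t ['.'] then PySem.List.slice t (some 1) none else t
     let t2 := if PySem.Chars.endswith t1 ['.'] then PySem.List.slice t1 none (some (-1)) else t1
     let t3 := if t2 = [] then ['a'] else t2
     let t4 := if 15 < t3.length then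
                 let u := PySem.List.slice t3 none (some 15)
                 if PySem.Chars.endswith u ['.'] then PySem.List.slice u none (some (-1)) else u
               else t3
     if t4.length < 3 then
       match PySem.List.pyGet? t4 (-1) with
       | some c => t4 ++ List.replicate (3 - t4.length) c
       | none => t4
     else t4) := by
  have e1 : (if PySem.Chars.startswith t ['.'] then PySem.List.slice t (some 1) none else t)
      = (if PySem.List.pyGet? t 0 = some '.' then PySem.List.slice t (some 1) none else t) := by
    by_cases h : PySem.List.pyGet? t 0 = some '.'
    · rw [if_pos h, if_pos ((pvStart_iff _ _).mpr h)]
    · rw [if_neg h, if_neg (fun hh => h ((pvStart_iff _ _).mp hh))]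
  simp only [e1]
  set l4 := if PySem.List.pyGet? t 0 = some '.' then PySem.List.slice t (some 1) none else t with hl4
  have e2 : (if PySem.Chars.endswith l4 ['.'] then PySem.List.slice l4 none (some (-1)) else l4)
      = (if PySem.List.slice l4 (some (-1)) none = ['.'] then PySem.List.slice l4 none (some (-1)) else l4) := by
    by_cases h : PySem.List.slice l4 (some (-1)) none = ['.']
    · rw [if_pos h, if_pos ((pvEnd_slice_iff _ _).mpr h)]
    · rw [if_neg h, if_neg (fun hh => h ((pvEnd_slice_iff _ _).mp hh))]
  simp only [e2]
  set l5 := if PySem.List.slice l4 (some (-1)) none = ['.'] then PySem.List.slice l4 none (some (-1)) else l4 with hl5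
  have e3 : (if l5 = [] then ['a'] else l5) = (if l5 = [] then l5 ++ ['a'] else l5) := by
    by_cases h : l5 = [] <;> simp [h]
  simp only [e3]
  set l6 := if l5 = [] then l5 ++ ['a'] else l5 with hl6
  have e4 : (if PySem.Chars.endswith (PySem.List.slice l6 none (some 15)) ['.'] then
        PySem.List.slice (PySem.List.slice l6 none (some 15)) none (some (-1))
      else PySem.List.slice l6 none (some 15))
      = (if PySem.List.pyGet? (PySem.List.slice l6 none (some 15)) (-1) = some '.' then
        PySem.List.slice (PySem.List.slice l6 none (some 15)) none (some (-1))
      else PySem.List.slice l6 none (some 15)) := by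
    by_cases h : PySem.List.pyGet? (PySem.List.slice l6 none (some 15)) (-1) = some '.'
    · rw [if_pos h, if_pos ((pvEnd_get_iff _ _).mpr h)]
    · rw [if_neg h, if_neg (fun hh => h ((pvEnd_get_iff _ _).mp hh))]
  simp only [e4]
  rw [pvPad_eq]

set_option maxHeartbeats 1000000 in
theorem pvMain (new_id : String) : solution new_id = solution_alt new_id := by
  unfold solution solution_alt
  dsimp only
  rw [pvStage2_eq, pvReplace_dd,
    pvAWhile_eq _ _ (by omega),
    pvFoldB, pvBC_eq]
  simp only [List.nil_append]
  congr 1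
  exact pvTail_eq (pvClps false ((PySem.Chars.lower new_id.toList).filter pvAllowed))

-- ===== VERDICT (by name: the statement is the Claim_ definition above) =====
theorem solution_spec : Claim_equal_solution := by
  intro new_id _ _
  unfold Spec_solution
  exact pvMain new_id
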